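-- pv_equiv track=rewrite | github.com/Herme02/Programacion-2022-2023- | ejercicio3Strings/ejercicio9.py | colocacion
-- ===== SOURCE A (Python) =====
-- def colocacion(cadena):
--     cadenaColocada = ""
--
--     vocales = "aeiou"
--     consonantes= "bcdfghjklmnñpqrstvwxyz"
--
--     for i in range(len(cadena)):
--         for j in range(len(consonantes)):
--             if(cadena[i] == consonantes[j]):
--                 cadenaColocada += consonantes[j]
--
--
--     for i in range(len(cadena)):
--         for k in range(len(vocales)):
--             if(cadena[i] == vocales[k]):
--                 cadenaColocada += vocales[k]
--
--     return cadenaColocada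
-- ===== SOURCE B (Python) =====
-- def colocacion(cadena):
--     vocales = "aeiou"
--     consonantes = "bcdfghjklmnñpqrstvwxyz"
--     cons = ""
--     voc = ""
--     for c in cadena:
--         if c in consonantes:
--             cons += c
--         elif c in vocales:
--             voc += c
--     return cons + voc
-- ===== Notes on version B (the rewrite author's own statement) =====
-- stated objective: faster
-- what changed: Single partitioning pass with two accumulators and substring-membership tests replaces A's two full scans each with an explicit inner character-by-character comparison loop.
import Mathlib
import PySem

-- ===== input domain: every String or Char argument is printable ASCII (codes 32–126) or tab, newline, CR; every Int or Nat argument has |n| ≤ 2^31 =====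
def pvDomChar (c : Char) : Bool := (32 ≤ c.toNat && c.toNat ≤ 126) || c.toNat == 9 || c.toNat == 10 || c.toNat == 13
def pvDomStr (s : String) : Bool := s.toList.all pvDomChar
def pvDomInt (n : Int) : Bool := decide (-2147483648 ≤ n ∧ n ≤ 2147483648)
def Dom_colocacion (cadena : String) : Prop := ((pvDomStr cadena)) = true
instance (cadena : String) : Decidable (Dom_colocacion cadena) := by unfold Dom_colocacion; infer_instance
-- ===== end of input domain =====

-- B replaces A's two full filter scans (each with an inner equality loop over the alphabet)
-- by ONE partitioning pass with two accumulators; objective: simpler.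

-- ===== PORT A =====
-- A scans the whole string once appending matching consonants (inner loop compares with
-- every consonant), then scans it again appending matching vowels.
def colocacion (cadena : String) : String :=
  let vocales : List Char := "aeiou".toList
  let consonantes : List Char := "bcdfghjklmnñpqrstvwxyz".toList
  let s1 : List Char := cadena.toList.foldl
    (fun acc c => consonantes.foldl (fun a d => if c = d then a ++ [d] else a) acc) []
  let s2 : List Char := cadena.toList.foldl
    (fun acc c => vocales.foldl (fun a d => if c = d then a ++ [d] else a) acc) s1
  String.mk s2

-- ===== PORT B =====
-- one pass, two accumulators, if/elif membership tests, then concatenate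
def colocacion_alt (cadena : String) : String :=
  let vocales : List Char := "aeiou".toList
  let consonantes : List Char := "bcdfghjklmnñpqrstvwxyz".toList
  let p : List Char × List Char := cadena.toList.foldl
    (fun p c =>
      if c ∈ consonantes then (p.1 ++ [c], p.2)
      else if c ∈ vocales then (p.1, p.2 ++ [c])
      else p) ([], [])
  String.mk (p.1 ++ p.2)

-- ===== PRECONDITION & SPEC =====
def Spec_colocacion (cadena : String) (out : String) : Prop := out = colocacion_alt cadena
instance (cadena : String) (out : String) : Decidable (Spec_colocacion cadena out) := by unfold Spec_colocacion; infer_instance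

-- ===== CLAIM (what is proved, stated in full; the proofs are below) =====
def Claim_equal_colocacion : Prop := ∀ (cadena : String), Dom_colocacion cadena → Spec_colocacion cadena (colocacion cadena)

-- ===== LEMMAS AND PROOFS =====

-- A's inner equality loop over a duplicate-free alphabet appends c iff c is in the alphabet.
theorem pv_inner_eq (l : List Char) (h : l.Nodup) (c : Char) (acc : List Char) :
    l.foldl (fun a d => if c = d then a ++ [d] else a) acc
      = if c ∈ l then acc ++ [c] else acc := by
  induction l generalizing acc with
  | nil => simp
  | cons d t ih =>
    rcases List.nodup_cons.mp h with ⟨hd, ht⟩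
    by_cases hc : c = d
    · subst hc
      simp only [List.foldl_cons, ih ht]
      simp [hd]
    · simp only [List.foldl_cons, if_neg hc, ih ht, List.mem_cons]
      simp [hc]

-- A's outer scan with that inner loop accumulates acc ++ filter.
theorem pv_scan_eq (al : List Char) (hal : al.Nodup) (l acc : List Char) :
    l.foldl (fun acc c => al.foldl (fun a d => if c = d then a ++ [d] else a) acc) acc
      = acc ++ l.filter (fun c => decide (c ∈ al)) := by
  induction l generalizing acc with
  | nil => simp
  | cons c t ih =>
    simp only [List.foldl_cons, pv_inner_eq al hal c acc, List.filter_cons]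
    by_cases hc : c ∈ al
    · simp [hc, ih]
    · simp [hc, ih]

-- B's single pass accumulates the two filters (the elif makes the vowel branch require ∉ consonants).
theorem pv_pass_eq (cs vs : List Char) (l co vo : List Char) :
    l.foldl (fun p c =>
        if c ∈ cs then (p.1 ++ [c], p.2)
        else if c ∈ vs then (p.1, p.2 ++ [c])
        else p) (co, vo)
      = (co ++ l.filter (fun c => decide (c ∈ cs)),
         vo ++ l.filter (fun c => decide (c ∉ cs) && decide (c ∈ vs))) := by
  induction l generalizing co vo with
  | nil => simp
  | cons c t ih =>
    simp only [List.foldl_cons, List.filter_cons]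
    by_cases h1 : c ∈ cs
    · simp [h1, ih]
    · by_cases h2 : c ∈ vs
      · simp [h1, h2, ih]
      · simp [h1, h2, ih]

-- no character is both a vowel and a consonant
theorem pv_disjoint (c : Char) (hv : c ∈ "aeiou".toList) :
    c ∉ "bcdfghjklmnñpqrstvwxyz".toList := by
  fin_cases hv <;> decide

-- ===== VERDICT (by name: the statement is the Claim_ definition above) =====
theorem colocacion_spec : Claim_equal_colocacion := by
  intro cadena _
  unfold Spec_colocacion colocacion colocacion_alt
  dsimp only
  rw [pv_scan_eq "bcdfghjklmn\u00f1pqrstvwxyz".toList (by decide),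
      pv_scan_eq "aeiou".toList (by decide), pv_pass_eq]
  simp only [List.nil_append]
  congr 2
  apply List.filter_congr
  intro c _
  by_cases hv : c ∈ "aeiou".toList
  · rw [decide_eq_true hv, decide_eq_true (pv_disjoint c hv), Bool.true_and]
  · rw [decide_eq_false hv, Bool.and_false]
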